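-- pv_equiv track=rewrite | github.com/johannessell/PhBlind | poolcheck.py | group_columns
-- ===== SOURCE A (Python) =====
-- def group_columns(rects, tol=20):
--     rects_sorted = sorted(rects, key=lambda r: r[0])
--     columns = []
--     for r in rects_sorted:
--         placed = False
--         for col in columns:
--             if abs(col[0][0] - r[0]) < tol:
--                 col.append(r)
--                 placed = True
--                 break
--         if not placed:
--             columns.append([r])
--     return columns
-- ===== SOURCE B (Python) =====
-- def group_columns(rects, tol=20):
--     columns = []
--     for r in sorted(rects, key=lambda r: r[0]):
--         if columns and abs(columns[-1][0][0] - r[0]) < tol: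
--             columns[-1].append(r)
--         else:
--             columns.append([r])
--     return columns
-- ===== Notes on version B (the rewrite author's own statement) =====
-- stated objective: simpler
-- what changed: Replaces A's first-fit inner scan over all existing columns with a single pass that compares each rect only against the last column (valid because column anchors end up >= tol apart in sorted order), dropping the inner loop and the placed flag.
import Mathlib
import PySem

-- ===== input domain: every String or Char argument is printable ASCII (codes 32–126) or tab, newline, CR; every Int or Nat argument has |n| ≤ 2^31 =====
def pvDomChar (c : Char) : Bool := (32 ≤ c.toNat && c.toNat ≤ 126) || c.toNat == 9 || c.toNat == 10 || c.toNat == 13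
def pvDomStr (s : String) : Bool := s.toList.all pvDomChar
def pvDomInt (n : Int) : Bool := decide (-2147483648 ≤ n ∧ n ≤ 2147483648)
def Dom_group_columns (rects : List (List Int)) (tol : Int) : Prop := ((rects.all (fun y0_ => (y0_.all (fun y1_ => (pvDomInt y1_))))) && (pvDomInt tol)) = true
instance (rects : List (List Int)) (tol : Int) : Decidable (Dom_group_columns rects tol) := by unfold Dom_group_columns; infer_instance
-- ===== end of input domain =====

-- B replaces A's first-fit scan over all existing columns with a one-pass check against only
-- the last column (objective: simpler; no inner loop, no 'placed' flag).


-- ===== PORT A =====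
-- col[0][0] ported as pvAnchor col, r[0] as r.headD 0: exact under Pre_ (all rects nonempty;
-- every column is nonempty by construction)
def pvAnchor (c : List (List Int)) : Int := (c.headD []).headD 0

-- the inner 'for col in columns: … break' with the 'placed' flag, as a first-fit recursion
def pvPlaceA (tol : Int) (r : List Int) : List (List (List Int)) → List (List (List Int))
  | [] => [[r]]
  | col :: rest =>
      if |pvAnchor col - r.headD 0| < tol then (col ++ [r]) :: rest
      else col :: pvPlaceA tol r rest

def group_columns (rects : List (List Int)) (tol : Int) : List (List (List Int)) :=
  (PySem.List.sorted rects (fun r => r.headD 0) false).foldl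
    (fun columns r => pvPlaceA tol r columns) []

-- ===== PORT B =====
def group_columns_alt (rects : List (List Int)) (tol : Int) : List (List (List Int)) :=
  (PySem.List.sorted rects (fun r => r.headD 0) false).foldl
    (fun columns r =>
      match columns.getLast? with
      | some col =>
          if |pvAnchor col - r.headD 0| < tol then
            columns.dropLast ++ [col ++ [r]]
          else
            columns ++ [[r]]
      | none => [[r]]) []

-- ===== PRECONDITION & SPEC =====
-- Pre_ excludes exactly the inputs where Python A raises IndexError: a rect with no coordinates (r[0]).
def Pre_group_columns (rects : List (List Int)) (tol : Int) : Prop := ∀ r ∈ rects, r ≠ []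
instance (rects : List (List Int)) (tol : Int) : Decidable (Pre_group_columns rects tol) := by unfold Pre_group_columns; infer_instance

def pvWitness_group_columns : List (List Int) × Int := ([[0, 1, 2, 3], [25, 0, 5, 5], [5, 9]], 20)

def Spec_group_columns (rects : List (List Int)) (tol : Int) (out : List (List (List Int))) : Prop := out = group_columns_alt rects tol
instance (rects : List (List Int)) (tol : Int) (out : List (List (List Int))) : Decidable (Spec_group_columns rects tol out) := by unfold Spec_group_columns; infer_instance

-- ===== CLAIM (what is proved, stated in full; the proofs are below) =====
def Claim_equal_group_columns : Prop := ∀ (rects : List (List Int)) (tol : Int), Dom_group_columns rects tol → Pre_group_columns rects tol → Spec_group_columns rects tol (group_columns rects tol)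

-- ===== LEMMAS AND PROOFS =====

-- A's first-fit insertion, when every non-last column misses, acts exactly on the last column
lemma pvPlaceA_eq_last (tol : Int) (x : List Int) :
    ∀ cols : List (List (List Int)),
      (∀ c ∈ cols.dropLast, ¬ (|pvAnchor c - x.headD 0| < tol)) →
      pvPlaceA tol x cols =
        match cols.getLast? with
        | some col =>
            if |pvAnchor col - x.headD 0| < tol then cols.dropLast ++ [col ++ [x]]
            else cols ++ [[x]]
        | none => [[x]] := by
  intro cols
  induction cols with
  | nil => intro _; rfl
  | cons c rest ih =>
    intro h
    cases rest with
    | nil =>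
      by_cases hc : |pvAnchor c - x.headD 0| < tol <;>
        simp [pvPlaceA]
    | cons d rest' =>
      have hc : ¬ |pvAnchor c - x.headD 0| < tol := h c (by simp)
      have hrec := ih (fun e he => h e (by
        simp only [List.dropLast_cons₂, List.mem_cons]
        exact Or.inr he))
      show (if |pvAnchor c - x.headD 0| < tol then (c ++ [x]) :: d :: rest'
            else c :: pvPlaceA tol x (d :: rest')) = _
      rw [if_neg hc, hrec, List.getLast?_cons_cons]
      cases hg : (d :: rest').getLast? with
      | none => simp at hg
      | some col =>
        simp only [hg]
        split <;> simp [List.dropLast_cons₂]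

-- loop invariant: columns nonempty, anchors pairwise ≥ tol apart, anchors ≤ all remaining keys
def pvInv (tol : Int) (cols : List (List (List Int))) (xs : List (List Int)) : Prop :=
  (∀ c ∈ cols, c ≠ []) ∧
  cols.Pairwise (fun c d => tol ≤ pvAnchor d - pvAnchor c) ∧
  (∀ c ∈ cols, ∀ y ∈ xs, pvAnchor c ≤ y.headD 0)

lemma pvAnchor_append (col : List (List Int)) (x : List Int) (h : col ≠ []) :
    pvAnchor (col ++ [x]) = pvAnchor col := by
  cases col with
  | nil => exact absurd rfl h
  | cons a t => simp [pvAnchor]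

lemma pvFold_eq (tol : Int) :
    ∀ (xs : List (List Int)) (cols : List (List (List Int))),
      xs.Pairwise (fun a b => a.headD 0 ≤ b.headD 0) →
      pvInv tol cols xs →
      xs.foldl (fun columns r => pvPlaceA tol r columns) cols =
      xs.foldl (fun columns r =>
          match columns.getLast? with
          | some col =>
              if |pvAnchor col - r.headD 0| < tol then
                columns.dropLast ++ [col ++ [r]]
              else columns ++ [[r]]
          | none => [[r]]) cols := by
  intro xs
  induction xs with
  | nil => intro _ _ _; rfl
  | cons x xs ih =>
    intro cols hsorted hinv
    obtain ⟨hne, hgap, hfut⟩ := hinv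
    rw [List.pairwise_cons] at hsorted
    obtain ⟨hsx, hsorted'⟩ := hsorted
    simp only [List.foldl_cons]
    cases hg : cols.getLast? with
    | none =>
      have hc0 : cols = [] := List.getLast?_eq_none_iff.1 hg
      subst hc0
      rw [pvPlaceA_eq_last tol x [] (by simp)]
      simp only [List.getLast?_nil]
      apply ih _ hsorted'
      refine ⟨by simp, by simp, ?_⟩
      intro c hc y hy
      simp only [List.mem_singleton] at hc
      subst hc
      simpa [pvAnchor] using hsx y hy
    | some col =>
      obtain ⟨l', rfl⟩ := List.getLast?_eq_some_iff.1 hg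
      have hcolmem : col ∈ l' ++ [col] := by simp
      have hle1 : pvAnchor col ≤ x.headD 0 := hfut col hcolmem x (by simp)
      have hskip : ∀ c ∈ l', ¬ (|pvAnchor c - x.headD 0| < tol) := by
        intro c hcmem
        have hpair : tol ≤ pvAnchor col - pvAnchor c :=
          (List.pairwise_append.1 hgap).2.2 c hcmem col (by simp)
        intro habs
        rw [abs_lt] at habs
        omega
      rw [pvPlaceA_eq_last tol x _ (by simpa [List.dropLast_concat] using hskip)]
      simp only [hg, List.dropLast_concat]
      have hcolne : col ≠ [] := hne col hcolmem
      by_cases hm : |pvAnchor col - x.headD 0| < tol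
      · rw [if_pos hm]
        apply ih _ hsorted'
        refine ⟨?_, ?_, ?_⟩
        · intro c hc
          rcases List.mem_append.1 hc with h | h
          · exact hne c (List.mem_append_left _ h)
          · simp only [List.mem_singleton] at h
            subst h
            simp
        · rw [List.pairwise_append] at hgap ⊢
          refine ⟨hgap.1, by simp, ?_⟩
          intro a ha b hb
          simp only [List.mem_singleton] at hb
          subst hb
          rw [pvAnchor_append col x hcolne]
          exact hgap.2.2 a ha col (by simp)
        · intro c hc y hy
          rcases List.mem_append.1 hc with h | h
          · exact hfut c (List.mem_append_left _ h) y (by simp [hy])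
          · simp only [List.mem_singleton] at h
            subst h
            rw [pvAnchor_append col x hcolne]
            exact hfut col hcolmem y (by simp [hy])
      · rw [if_neg hm]
        apply ih _ hsorted'
        have hgapx : ∀ c ∈ l' ++ [col], tol ≤ pvAnchor [x] - pvAnchor c := by
          intro c hc
          rcases List.mem_append.1 hc with h | h
          · have h1 := hskip c h
            have h2 : pvAnchor c ≤ x.headD 0 := hfut c (List.mem_append_left _ h) x (by simp)
            simp only [pvAnchor, List.headD_cons]
            rw [abs_lt] at h1
            simp only [pvAnchor] at h1 h2
            omega
          · simp only [List.mem_singleton] at h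
            subst h
            simp only [pvAnchor, List.headD_cons]
            rw [abs_lt] at hm
            simp only [pvAnchor] at hm hle1
            omega
        refine ⟨?_, ?_, ?_⟩
        · intro c hc
          rcases List.mem_append.1 hc with h | h
          · exact hne c h
          · simp only [List.mem_singleton] at h
            subst h
            simp
        · rw [List.pairwise_append]
          refine ⟨hgap, by simp, ?_⟩
          intro a ha b hb
          simp only [List.mem_singleton] at hb
          subst hb
          exact hgapx a ha
        · intro c hc y hy
          rcases List.mem_append.1 hc with h | h
          · exact hfut c h y (by simp [hy])
          · simp only [List.mem_singleton] at h
            subst h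
            simpa [pvAnchor] using hsx y hy

-- ===== VERDICT (by name: the statement is the Claim_ definition above) =====
theorem group_columns_spec : Claim_equal_group_columns := by
  intro rects tol _ _
  unfold Spec_group_columns group_columns group_columns_alt
  exact pvFold_eq tol _ []
    (PySem.List.sorted_pairwise rects (fun r => r.headD 0))
    ⟨by simp, by simp, by simp⟩
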